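-- pv_equiv track=rewrite | github.com/sungyeon2022/pyCode | Python/약수의 개수와 덧셈.py | count
-- ===== SOURCE A (Python) =====
-- def count(a):
--     cou = 0
--     for i in range(1,a+1):
--         if a%i==0:
--             cou+=1
--     if cou%2==0:
--         return True
--     else:
--         return False
-- ===== SOURCE B (Python) =====
-- import math
--
-- def count(a):
--     # divisor count of a is odd iff a is a perfect square
--     if a <= 0:
--         return True
--     r = math.isqrt(a)
--     return r * r != a
-- ===== Notes on version B (the rewrite author's own statement) =====
-- stated objective: faster
-- what changed: Replaces the O(a) trial-division divisor-counting loop with an O(1) perfect-square test via math.isqrt (divisor count is odd iff a is a perfect square; a<=0 has zero divisors counted, hence True).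
import Mathlib
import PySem

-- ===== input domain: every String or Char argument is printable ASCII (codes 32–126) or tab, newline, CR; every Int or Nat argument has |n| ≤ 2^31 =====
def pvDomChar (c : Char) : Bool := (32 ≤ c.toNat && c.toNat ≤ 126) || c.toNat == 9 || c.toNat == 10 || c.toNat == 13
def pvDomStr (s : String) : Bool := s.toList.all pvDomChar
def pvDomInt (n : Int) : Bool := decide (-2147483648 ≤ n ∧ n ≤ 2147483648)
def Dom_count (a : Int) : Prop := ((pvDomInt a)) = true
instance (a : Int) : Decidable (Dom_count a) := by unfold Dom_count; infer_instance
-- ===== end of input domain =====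

-- B replaces A's O(a) trial-division divisor-counting loop by an O(1) perfect-square test
-- (the divisor count of a positive integer is odd iff it is a perfect square; for a ≤ 0 the
-- loop counts zero divisors, so the result is True).

-- ===== PORT A =====
def count (a : Int) : Bool :=
  let cou : Int :=
    (PySem.List.pyRange 1 (a + 1) 1).foldl
      (fun cou i => if PySem.Int.mod a i = 0 then cou + 1 else cou) 0
  if PySem.Int.mod cou 2 = 0 then true else false

-- ===== PORT B =====
-- math.isqrt is ported as Nat.sqrt (floor square root).
def count_alt (a : Int) : Bool :=
  if a ≤ 0 then true
  else
    let r : Nat := Nat.sqrt a.toNat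
    decide (r * r ≠ a.toNat)

-- ===== PRECONDITION & SPEC =====
def Spec_count (a : Int) (out : Bool) : Prop := out = count_alt a
instance (a : Int) (out : Bool) : Decidable (Spec_count a out) := by unfold Spec_count; infer_instance

-- ===== CLAIM (what is proved, stated in full; the proofs are below) =====
def Claim_equal_count : Prop := ∀ (a : Int), Dom_count a → Spec_count a (count a)

-- ===== LEMMAS AND PROOFS =====

-- A's counting loop is a countP over the range.
lemma count_loop_eq_countP (a : Int) :
    (PySem.List.pyRange 1 (a + 1) 1).foldl
      (fun cou i => if PySem.Int.mod a i = 0 then cou + 1 else cou) (0 : Int)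
      = ((PySem.List.pyRange 1 (a + 1) 1).countP (fun i => decide (PySem.Int.mod a i = 0)) : Int) := by
  simpa using PySem.List.foldl_ite_add_one (fun i => PySem.Int.mod a i = 0)
    (PySem.List.pyRange 1 (a + 1) 1) 0

-- countP of the shifted predicate over List.range n is the number of divisors of n.
lemma countP_eq_card_divisors (n : ℕ) (hn : 0 < n) :
    (List.range n).countP (fun k => decide ((k + 1) ∣ n)) = n.divisors.card := by
  have h1 : ((Finset.range n).filter (fun k => (k + 1) ∣ n)).card
      = (List.range n).countP (fun k => decide ((k + 1) ∣ n)) := by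
    rw [List.countP_eq_length_filter]; rfl
  rw [← h1]
  refine Finset.card_bij (fun k _ => k + 1) ?_ ?_ ?_
  · intro k hk
    rcases Finset.mem_filter.mp hk with ⟨hr, hd⟩
    exact Nat.mem_divisors.mpr ⟨hd, hn.ne'⟩
  · intro k₁ h₁ k₂ h₂ h
    simp only at h
    omega
  · intro d hd
    rcases Nat.mem_divisors.mp hd with ⟨hdvd, _⟩
    have hd1 : 1 ≤ d := Nat.pos_of_dvd_of_pos hdvd hn
    have hdn : d ≤ n := Nat.le_of_dvd hn hdvd
    refine ⟨d - 1, Finset.mem_filter.mpr ⟨Finset.mem_range.mpr (by omega), ?_⟩, by simp; omega⟩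
    simpa [Nat.sub_add_cancel hd1] using hdvd

-- The non-self-paired divisors pair up under d ↦ n / d, so there are evenly many of them.
lemma even_card_T (n : ℕ) (hn : 0 < n) :
    Even ((n.divisors.filter (fun d => ¬ d * d = n)).card) := by
  classical
  set T := n.divisors.filter (fun d => ¬ d * d = n) with hT
  have mem_T : ∀ d, d ∈ T → d ∣ n ∧ ¬ d * d = n := by
    intro d hd
    rcases Finset.mem_filter.mp hd with ⟨hdiv, hne⟩
    exact ⟨(Nat.mem_divisors.mp hdiv).1, hne⟩
  have hsum : (∑ _x ∈ T, (1 : ZMod 2)) = 0 := by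
    refine Finset.sum_involution (fun d _ => n / d) ?_ ?_ ?_ ?_
    · intro a _; decide
    · intro a ha _
      rcases mem_T a ha with ⟨hdvd, hne⟩
      intro hEq
      replace hEq : n / a = a := hEq
      exact hne (by rw [← Nat.mul_div_cancel' hdvd, hEq])
    · intro a ha
      rcases mem_T a ha with ⟨hdvd, hne⟩
      show n / a ∈ T
      have ha0 : 0 < a := Nat.pos_of_dvd_of_pos hdvd hn
      have hq : a * (n / a) = n := Nat.mul_div_cancel' hdvd
      have hdvd' : n / a ∣ n := Nat.div_dvd_of_dvd hdvd
      refine Finset.mem_filter.mpr ⟨Nat.mem_divisors.mpr ⟨hdvd', hn.ne'⟩, ?_⟩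
      intro hEq
      have : a * (n / a) = (n / a) * (n / a) := by rw [hq, hEq]
      have hq0 : 0 < n / a := Nat.div_pos (Nat.le_of_dvd hn hdvd) ha0
      have heq : a = n / a := Nat.eq_of_mul_eq_mul_right hq0 this
      refine hne ?_
      rw [← heq] at hEq
      exact hEq
    · intro a ha
      rcases mem_T a ha with ⟨hdvd, _⟩
      show n / (n / a) = a
      exact Nat.div_div_self hdvd hn.ne'
  have hcard : ((T.card : ZMod 2)) = 0 := by
    rw [← hsum]; simp
  exact ZMod.natCast_eq_zero_iff_even.mp hcard

-- The self-paired divisors: one if n is a perfect square, none otherwise.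
lemma card_F (n : ℕ) (hn : 0 < n) :
    (n.divisors.filter (fun d => d * d = n)).card
      = if Nat.sqrt n * Nat.sqrt n = n then 1 else 0 := by
  classical
  by_cases hsq : Nat.sqrt n * Nat.sqrt n = n
  · rw [if_pos hsq]
    rw [Finset.card_eq_one]
    refine ⟨Nat.sqrt n, ?_⟩
    ext d
    simp only [Finset.mem_filter, Nat.mem_divisors, Finset.mem_singleton]
    constructor
    · rintro ⟨_, hdd⟩
      exact Nat.mul_self_inj.mp (hdd.trans hsq.symm)
    · rintro rfl
      exact ⟨⟨⟨Nat.sqrt n, hsq.symm⟩, hn.ne'⟩, hsq⟩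
  · rw [if_neg hsq, Finset.card_eq_zero, Finset.filter_eq_empty_iff]
    intro d _ hdd
    exact hsq ((Nat.exists_mul_self n).mp ⟨d, hdd⟩)

lemma even_card_divisors_iff (n : ℕ) (hn : 0 < n) :
    Even n.divisors.card ↔ Nat.sqrt n * Nat.sqrt n ≠ n := by
  classical
  have hsplit : (n.divisors.filter (fun d => d * d = n)).card
      + (n.divisors.filter (fun d => ¬ d * d = n)).card = n.divisors.card :=
    Finset.card_filter_add_card_filter_not (s := n.divisors) (p := fun d => d * d = n)
  rcases even_card_T n hn with ⟨t, ht⟩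
  have hF := card_F n hn
  rw [Nat.even_iff]
  by_cases hsq : Nat.sqrt n * Nat.sqrt n = n
  · rw [if_pos hsq] at hF; simp only [hsq, ne_eq, not_true_eq_false, iff_false]; omega
  · rw [if_neg hsq] at hF; simp only [hsq, ne_eq, not_false_eq_true, iff_true]; omega

-- ===== VERDICT (by name: the statement is the Claim_ definition above) =====
theorem count_spec : Claim_equal_count := by
  intro a _
  unfold Spec_count count count_alt
  by_cases ha : a ≤ 0
  · rw [PySem.List.pyRange_one_eq_nil (by omega)]
    simp [ha, PySem.Int.mod]
  · have ha' : 0 < a := by omega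
    set n : ℕ := a.toNat with hn
    have han : a = (n : Int) := by omega
    rw [if_neg ha]
    rw [count_loop_eq_countP]
    have hrange : PySem.List.pyRange 1 (a + 1) 1
        = (List.range ((a + 1) - 1).toNat).map (fun k : ℕ => (1 : Int) + (k : Int)) := by
      rw [PySem.List.pyRange_one]
    have htn : ((a + 1) - 1).toNat = n := by omega
    rw [hrange, htn, List.countP_map]
    have hpred : ∀ k : ℕ,
        (fun i => decide (PySem.Int.mod a i = 0)) ((1 : Int) + k)
          = decide ((k + 1) ∣ n) := by
      intro k
      have : PySem.Int.mod a ((1 : Int) + k) = 0 ↔ ((1 : Int) + k) ∣ a :=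
        PySem.Int.mod_eq_zero_iff_dvd a ((1 : Int) + k)
      rw [decide_eq_decide]
      rw [this, han]
      have : ((1 : Int) + k) = ((k + 1 : ℕ) : Int) := by push_cast; ring
      rw [this, Int.natCast_dvd_natCast]
    have hc : (List.range n).countP
        ((fun i => decide (PySem.Int.mod a i = 0)) ∘ (fun k : ℕ => (1 : Int) + (k : Int)))
        = n.divisors.card := by
      rw [← countP_eq_card_divisors n (by omega)]
      apply List.countP_congr
      intro k _
      simpa using congrArg (· = true) (hpred k)
    rw [hc]
    show (if PySem.Int.mod ((n.divisors.card : ℕ) : Int) 2 = 0 then true else false)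
        = decide (Nat.sqrt n * Nat.sqrt n ≠ n)
    have hmod : PySem.Int.mod ((n.divisors.card : ℕ) : Int) 2
        = ((n.divisors.card : ℕ) : Int) % 2 := by
      rw [PySem.Int.mod_eq_emod_of_pos]
      norm_num
    rw [hmod]
    by_cases hev : Even n.divisors.card
    · have h2 : ((n.divisors.card : ℕ) : Int) % 2 = 0 := by
        rcases hev with ⟨t, ht⟩
        omega
      have hne : Nat.sqrt n * Nat.sqrt n ≠ n := (even_card_divisors_iff n (by omega)).mp hev
      simp [h2, hne]
    · have h2 : ¬ ((n.divisors.card : ℕ) : Int) % 2 = 0 := by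
        rw [Nat.not_even_iff] at hev
        omega
      have hne : ¬ Nat.sqrt n * Nat.sqrt n ≠ n := by
        intro h
        exact hev ((even_card_divisors_iff n (by omega)).mpr h)
      simp [h2, not_not.mp hne]
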